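-- pv_equiv track=rewrite | github.com/acuteIQ/missing_data_prediction | get_range.py | get_employee_range
-- ===== SOURCE A (Python) =====
-- employee_ranges=[
--     {'min': 0, 'max': 4, 'symbol': 'A'},
--     {'min': 5, 'max': 9, 'symbol': 'B'},
--     {'min': 10, 'max': 19, 'symbol': 'C'},
--     {'min': 20, 'max': 49, 'symbol': 'D'},
--     {'min': 50, 'max': 99, 'symbol': 'E'},
--     {'min': 100, 'max': 249, 'symbol': 'F'},
--     {'min': 250, 'max': 499, 'symbol': 'G'},
--     {'min': 500, 'max': 999, 'symbol': 'H'},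
--     {'min': 1000, 'max': 4999, 'symbol': 'I'},
--     {'min': 5000, 'max': 9999, 'symbol': 'J'},
--     {'min': 10000, 'max': float('inf'), 'symbol': 'K'},
-- ]
--
-- def get_employee_range(value, range_type='index'):
--     for sr_index, sr in enumerate(employee_ranges):
--         if sr['min'] <= value and value <= sr['max']:
--             if range_type == 'index':
--                 return sr_index
--             else:
--                 return sr['symbol']
--
--     raise Exception( str('get_employee_range broke! ' + str(value) + ' employee_ranges ' + str(employee_ranges)) )
-- ===== SOURCE B (Python) =====
-- employee_ranges=[
--     {'min': 0, 'max': 4, 'symbol': 'A'},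
--     {'min': 5, 'max': 9, 'symbol': 'B'},
--     {'min': 10, 'max': 19, 'symbol': 'C'},
--     {'min': 20, 'max': 49, 'symbol': 'D'},
--     {'min': 50, 'max': 99, 'symbol': 'E'},
--     {'min': 100, 'max': 249, 'symbol': 'F'},
--     {'min': 250, 'max': 499, 'symbol': 'G'},
--     {'min': 500, 'max': 999, 'symbol': 'H'},
--     {'min': 1000, 'max': 4999, 'symbol': 'I'},
--     {'min': 5000, 'max': 9999, 'symbol': 'J'},
--     {'min': 10000, 'max': float('inf'), 'symbol': 'K'},
-- ]
--
-- _bounds = [0, 5, 10, 20, 50, 100, 250, 500, 1000, 5000, 10000]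
-- _symbols = ['A', 'B', 'C', 'D', 'E', 'F', 'G', 'H', 'I', 'J', 'K']
--
-- def get_employee_range(value, range_type='index'):
--     # binary search: bisect_right(_bounds, value) - 1, written by hand (no imports in this module)
--     lo, hi = 0, len(_bounds)
--     while lo < hi:
--         mid = (lo + hi) // 2
--         if _bounds[mid] <= value:
--             lo = mid + 1
--         else:
--             hi = mid
--     idx = lo - 1
--     if idx < 0:
--         raise Exception('get_employee_range broke! ' + str(value) + ' employee_ranges ' + str(employee_ranges))
--     return idx if range_type == 'index' else _symbols[idx]
-- ===== Notes on version B (the rewrite author's own statement) =====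
-- stated objective: alternative
-- what changed: Replaces the linear enumerate-scan over the range dicts with a hand-written binary search (bisect_right) over a sorted list of lower bounds, then one sign check for the raise path.
import Mathlib
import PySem

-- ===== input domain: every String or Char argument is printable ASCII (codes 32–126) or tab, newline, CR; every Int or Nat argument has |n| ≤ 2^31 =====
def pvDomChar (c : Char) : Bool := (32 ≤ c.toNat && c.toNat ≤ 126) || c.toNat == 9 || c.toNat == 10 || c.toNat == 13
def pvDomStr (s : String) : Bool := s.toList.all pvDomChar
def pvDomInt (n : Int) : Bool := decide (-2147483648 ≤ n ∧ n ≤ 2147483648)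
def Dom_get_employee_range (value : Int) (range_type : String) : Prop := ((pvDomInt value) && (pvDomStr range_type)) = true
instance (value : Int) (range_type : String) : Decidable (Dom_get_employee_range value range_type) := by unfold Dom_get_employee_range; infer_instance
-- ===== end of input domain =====

-- B replaces A's linear scan over the range dicts with a binary search over the sorted lower bounds (alternative decomposition).


-- ===== PORT A =====
-- the module-level table; 'max': float('inf') is the `none` case (value ≤ inf is always true)
def employeeRanges : List (Int × Option Int × String) :=
  [(0, some 4, "A"), (5, some 9, "B"), (10, some 19, "C"), (20, some 49, "D"),
   (50, some 99, "E"), (100, some 249, "F"), (250, some 499, "G"), (500, some 999, "H"),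
   (1000, some 4999, "I"), (5000, some 9999, "J"), (10000, none, "K")]

-- the enumerate-scan; Python returns the int index for range_type == 'index', rendered as its str here
def aLoop (i : Int) (rs : List (Int × Option Int × String)) (value : Int) (range_type : String) : Option String :=
  match rs with
  | [] => none
  | (mn, mx, sym) :: rest =>
    if mn ≤ value && (match mx with | some m => decide (value ≤ m) | none => true) then
      if range_type == "index" then some (PySem.Int.toStr i) else some sym
    else aLoop (i + 1) rest value range_type

def get_employee_range (value : Int) (range_type : String) : String :=
  ((aLoop 0 employeeRanges value range_type).getD "")  -- none = the final `raise Exception(...)`, excluded by Pre_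

-- ===== PORT B =====
def bBounds : List Int := [0, 5, 10, 20, 50, 100, 250, 500, 1000, 5000, 10000]
def bSymbols : List String := ["A", "B", "C", "D", "E", "F", "G", "H", "I", "J", "K"]

-- B's while-loop binary search; fuel = len(_bounds) only makes the loop total (hi - lo shrinks each pass)
def bsLoop : Nat → Nat → Nat → Int → Nat
  | 0, lo, _, _ => lo
  | fuel + 1, lo, hi, value =>
    if lo < hi then
      let mid := (lo + hi) / 2
      if bBounds.getD mid 0 ≤ value then bsLoop fuel (mid + 1) hi value
      else bsLoop fuel lo mid value
    else lo

def get_employee_range_alt (value : Int) (range_type : String) : String :=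
  let lo := bsLoop bBounds.length 0 bBounds.length value
  let idx : Int := (lo : Int) - 1
  if idx < 0 then ""  -- the `raise Exception(...)` path, excluded by Pre_
  else if range_type == "index" then PySem.Int.toStr idx
  else bSymbols.getD idx.toNat ""

-- ===== PRECONDITION & SPEC =====
-- A raises its Exception exactly on negative values (B raises there too); those inputs are excluded.
def Pre_get_employee_range (value : Int) (range_type : String) : Prop := 0 ≤ value
instance (value : Int) (range_type : String) : Decidable (Pre_get_employee_range value range_type) := by unfold Pre_get_employee_range; infer_instance
def pvWitness_get_employee_range : Int × String := (7, "symbol")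

def Spec_get_employee_range (value : Int) (range_type : String) (out : String) : Prop := out = get_employee_range_alt value range_type
instance (value : Int) (range_type : String) (out : String) : Decidable (Spec_get_employee_range value range_type out) := by unfold Spec_get_employee_range; infer_instance

-- ===== CLAIM (what is proved, stated in full; the proofs are below) =====
def Claim_equal_get_employee_range : Prop := ∀ (value : Int) (range_type : String), Dom_get_employee_range value range_type → Pre_get_employee_range value range_type → Spec_get_employee_range value range_type (get_employee_range value range_type)

-- ===== LEMMAS AND PROOFS =====

-- ===== VERDICT (by name: the statement is the Claim_ definition above) =====
theorem get_employee_range_spec : Claim_equal_get_employee_range := by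
  intro v rt _ hpre
  unfold Spec_get_employee_range get_employee_range get_employee_range_alt
  have h0 : (0:Int) ≤ v := hpre
  by_cases hc0 : v ≤ 4
  · simp [aLoop, employeeRanges, bsLoop, bBounds, bSymbols, h0, show ¬((5:Int) ≤ v) from by omega, show ¬((10:Int) ≤ v) from by omega, show ¬((20:Int) ≤ v) from by omega, show ¬((50:Int) ≤ v) from by omega, show ¬((100:Int) ≤ v) from by omega, show ¬((250:Int) ≤ v) from by omega, show ¬((500:Int) ≤ v) from by omega, show ¬((1000:Int) ≤ v) from by omega, show ¬((5000:Int) ≤ v) from by omega, show ¬((10000:Int) ≤ v) from by omega, show (v ≤ (4:Int)) from by omega, show (v ≤ (9:Int)) from by omega, show (v ≤ (19:Int)) from by omega, show (v ≤ (49:Int)) from by omega, show (v ≤ (99:Int)) from by omega, show (v ≤ (249:Int)) from by omega, show (v ≤ (499:Int)) from by omega, show (v ≤ (999:Int)) from by omega, show (v ≤ (4999:Int)) from by omega, show (v ≤ (9999:Int)) from by omega]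
    norm_num
    split <;> simp_all
  by_cases hc1 : v ≤ 9
  · simp [aLoop, employeeRanges, bsLoop, bBounds, bSymbols, h0, show ((5:Int) ≤ v) from by omega, show ¬((10:Int) ≤ v) from by omega, show ¬((20:Int) ≤ v) from by omega, show ¬((50:Int) ≤ v) from by omega, show ¬((100:Int) ≤ v) from by omega, show ¬((250:Int) ≤ v) from by omega, show ¬((500:Int) ≤ v) from by omega, show ¬((1000:Int) ≤ v) from by omega, show ¬((5000:Int) ≤ v) from by omega, show ¬((10000:Int) ≤ v) from by omega, show ¬(v ≤ (4:Int)) from by omega, show (v ≤ (9:Int)) from by omega, show (v ≤ (19:Int)) from by omega, show (v ≤ (49:Int)) from by omega, show (v ≤ (99:Int)) from by omega, show (v ≤ (249:Int)) from by omega, show (v ≤ (499:Int)) from by omega, show (v ≤ (999:Int)) from by omega, show (v ≤ (4999:Int)) from by omega, show (v ≤ (9999:Int)) from by omega]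
    norm_num
    split <;> simp_all
  by_cases hc2 : v ≤ 19
  · simp [aLoop, employeeRanges, bsLoop, bBounds, bSymbols, h0, show ((5:Int) ≤ v) from by omega, show ((10:Int) ≤ v) from by omega, show ¬((20:Int) ≤ v) from by omega, show ¬((50:Int) ≤ v) from by omega, show ¬((100:Int) ≤ v) from by omega, show ¬((250:Int) ≤ v) from by omega, show ¬((500:Int) ≤ v) from by omega, show ¬((1000:Int) ≤ v) from by omega, show ¬((5000:Int) ≤ v) from by omega, show ¬((10000:Int) ≤ v) from by omega, show ¬(v ≤ (4:Int)) from by omega, show ¬(v ≤ (9:Int)) from by omega, show (v ≤ (19:Int)) from by omega, show (v ≤ (49:Int)) from by omega, show (v ≤ (99:Int)) from by omega, show (v ≤ (249:Int)) from by omega, show (v ≤ (499:Int)) from by omega, show (v ≤ (999:Int)) from by omega, show (v ≤ (4999:Int)) from by omega, show (v ≤ (9999:Int)) from by omega]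
    norm_num
    split <;> simp_all
  by_cases hc3 : v ≤ 49
  · simp [aLoop, employeeRanges, bsLoop, bBounds, bSymbols, h0, show ((5:Int) ≤ v) from by omega, show ((10:Int) ≤ v) from by omega, show ((20:Int) ≤ v) from by omega, show ¬((50:Int) ≤ v) from by omega, show ¬((100:Int) ≤ v) from by omega, show ¬((250:Int) ≤ v) from by omega, show ¬((500:Int) ≤ v) from by omega, show ¬((1000:Int) ≤ v) from by omega, show ¬((5000:Int) ≤ v) from by omega, show ¬((10000:Int) ≤ v) from by omega, show ¬(v ≤ (4:Int)) from by omega, show ¬(v ≤ (9:Int)) from by omega, show ¬(v ≤ (19:Int)) from by omega, show (v ≤ (49:Int)) from by omega, show (v ≤ (99:Int)) from by omega, show (v ≤ (249:Int)) from by omega, show (v ≤ (499:Int)) from by omega, show (v ≤ (999:Int)) from by omega, show (v ≤ (4999:Int)) from by omega, show (v ≤ (9999:Int)) from by omega]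
    norm_num
    split <;> simp_all
  by_cases hc4 : v ≤ 99
  · simp [aLoop, employeeRanges, bsLoop, bBounds, bSymbols, h0, show ((5:Int) ≤ v) from by omega, show ((10:Int) ≤ v) from by omega, show ((20:Int) ≤ v) from by omega, show ((50:Int) ≤ v) from by omega, show ¬((100:Int) ≤ v) from by omega, show ¬((250:Int) ≤ v) from by omega, show ¬((500:Int) ≤ v) from by omega, show ¬((1000:Int) ≤ v) from by omega, show ¬((5000:Int) ≤ v) from by omega, show ¬((10000:Int) ≤ v) from by omega, show ¬(v ≤ (4:Int)) from by omega, show ¬(v ≤ (9:Int)) from by omega, show ¬(v ≤ (19:Int)) from by omega, show ¬(v ≤ (49:Int)) from by omega, show (v ≤ (99:Int)) from by omega, show (v ≤ (249:Int)) from by omega, show (v ≤ (499:Int)) from by omega, show (v ≤ (999:Int)) from by omega, show (v ≤ (4999:Int)) from by omega, show (v ≤ (9999:Int)) from by omega]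
    norm_num
    split <;> simp_all
  by_cases hc5 : v ≤ 249
  · simp [aLoop, employeeRanges, bsLoop, bBounds, bSymbols, h0, show ((5:Int) ≤ v) from by omega, show ((10:Int) ≤ v) from by omega, show ((20:Int) ≤ v) from by omega, show ((50:Int) ≤ v) from by omega, show ((100:Int) ≤ v) from by omega, show ¬((250:Int) ≤ v) from by omega, show ¬((500:Int) ≤ v) from by omega, show ¬((1000:Int) ≤ v) from by omega, show ¬((5000:Int) ≤ v) from by omega, show ¬((10000:Int) ≤ v) from by omega, show ¬(v ≤ (4:Int)) from by omega, show ¬(v ≤ (9:Int)) from by omega, show ¬(v ≤ (19:Int)) from by omega, show ¬(v ≤ (49:Int)) from by omega, show ¬(v ≤ (99:Int)) from by omega, show (v ≤ (249:Int)) from by omega, show (v ≤ (499:Int)) from by omega, show (v ≤ (999:Int)) from by omega, show (v ≤ (4999:Int)) from by omega, show (v ≤ (9999:Int)) from by omega]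
    norm_num
    split <;> simp_all
  by_cases hc6 : v ≤ 499
  · simp [aLoop, employeeRanges, bsLoop, bBounds, bSymbols, h0, show ((5:Int) ≤ v) from by omega, show ((10:Int) ≤ v) from by omega, show ((20:Int) ≤ v) from by omega, show ((50:Int) ≤ v) from by omega, show ((100:Int) ≤ v) from by omega, show ((250:Int) ≤ v) from by omega, show ¬((500:Int) ≤ v) from by omega, show ¬((1000:Int) ≤ v) from by omega, show ¬((5000:Int) ≤ v) from by omega, show ¬((10000:Int) ≤ v) from by omega, show ¬(v ≤ (4:Int)) from by omega, show ¬(v ≤ (9:Int)) from by omega, show ¬(v ≤ (19:Int)) from by omega, show ¬(v ≤ (49:Int)) from by omega, show ¬(v ≤ (99:Int)) from by omega, show ¬(v ≤ (249:Int)) from by omega, show (v ≤ (499:Int)) from by omega, show (v ≤ (999:Int)) from by omega, show (v ≤ (4999:Int)) from by omega, show (v ≤ (9999:Int)) from by omega]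
    norm_num
    split <;> simp_all
  by_cases hc7 : v ≤ 999
  · simp [aLoop, employeeRanges, bsLoop, bBounds, bSymbols, h0, show ((5:Int) ≤ v) from by omega, show ((10:Int) ≤ v) from by omega, show ((20:Int) ≤ v) from by omega, show ((50:Int) ≤ v) from by omega, show ((100:Int) ≤ v) from by omega, show ((250:Int) ≤ v) from by omega, show ((500:Int) ≤ v) from by omega, show ¬((1000:Int) ≤ v) from by omega, show ¬((5000:Int) ≤ v) from by omega, show ¬((10000:Int) ≤ v) from by omega, show ¬(v ≤ (4:Int)) from by omega, show ¬(v ≤ (9:Int)) from by omega, show ¬(v ≤ (19:Int)) from by omega, show ¬(v ≤ (49:Int)) from by omega, show ¬(v ≤ (99:Int)) from by omega, show ¬(v ≤ (249:Int)) from by omega, show ¬(v ≤ (499:Int)) from by omega, show (v ≤ (999:Int)) from by omega, show (v ≤ (4999:Int)) from by omega, show (v ≤ (9999:Int)) from by omega]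
    norm_num
    split <;> simp_all
  by_cases hc8 : v ≤ 4999
  · simp [aLoop, employeeRanges, bsLoop, bBounds, bSymbols, h0, show ((5:Int) ≤ v) from by omega, show ((10:Int) ≤ v) from by omega, show ((20:Int) ≤ v) from by omega, show ((50:Int) ≤ v) from by omega, show ((100:Int) ≤ v) from by omega, show ((250:Int) ≤ v) from by omega, show ((500:Int) ≤ v) from by omega, show ((1000:Int) ≤ v) from by omega, show ¬((5000:Int) ≤ v) from by omega, show ¬((10000:Int) ≤ v) from by omega, show ¬(v ≤ (4:Int)) from by omega, show ¬(v ≤ (9:Int)) from by omega, show ¬(v ≤ (19:Int)) from by omega, show ¬(v ≤ (49:Int)) from by omega, show ¬(v ≤ (99:Int)) from by omega, show ¬(v ≤ (249:Int)) from by omega, show ¬(v ≤ (499:Int)) from by omega, show ¬(v ≤ (999:Int)) from by omega, show (v ≤ (4999:Int)) from by omega, show (v ≤ (9999:Int)) from by omega]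
    norm_num
    split <;> simp_all
  by_cases hc9 : v ≤ 9999
  · simp [aLoop, employeeRanges, bsLoop, bBounds, bSymbols, h0, show ((5:Int) ≤ v) from by omega, show ((10:Int) ≤ v) from by omega, show ((20:Int) ≤ v) from by omega, show ((50:Int) ≤ v) from by omega, show ((100:Int) ≤ v) from by omega, show ((250:Int) ≤ v) from by omega, show ((500:Int) ≤ v) from by omega, show ((1000:Int) ≤ v) from by omega, show ((5000:Int) ≤ v) from by omega, show ¬((10000:Int) ≤ v) from by omega, show ¬(v ≤ (4:Int)) from by omega, show ¬(v ≤ (9:Int)) from by omega, show ¬(v ≤ (19:Int)) from by omega, show ¬(v ≤ (49:Int)) from by omega, show ¬(v ≤ (99:Int)) from by omega, show ¬(v ≤ (249:Int)) from by omega, show ¬(v ≤ (499:Int)) from by omega, show ¬(v ≤ (999:Int)) from by omega, show ¬(v ≤ (4999:Int)) from by omega, show (v ≤ (9999:Int)) from by omega]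
    norm_num
    split <;> simp_all
  · simp [aLoop, employeeRanges, bsLoop, bBounds, bSymbols, h0, show ((5:Int) ≤ v) from by omega, show ((10:Int) ≤ v) from by omega, show ((20:Int) ≤ v) from by omega, show ((50:Int) ≤ v) from by omega, show ((100:Int) ≤ v) from by omega, show ((250:Int) ≤ v) from by omega, show ((500:Int) ≤ v) from by omega, show ((1000:Int) ≤ v) from by omega, show ((5000:Int) ≤ v) from by omega, show ((10000:Int) ≤ v) from by omega, show ¬(v ≤ (4:Int)) from by omega, show ¬(v ≤ (9:Int)) from by omega, show ¬(v ≤ (19:Int)) from by omega, show ¬(v ≤ (49:Int)) from by omega, show ¬(v ≤ (99:Int)) from by omega, show ¬(v ≤ (249:Int)) from by omega, show ¬(v ≤ (499:Int)) from by omega, show ¬(v ≤ (999:Int)) from by omega, show ¬(v ≤ (4999:Int)) from by omega, show ¬(v ≤ (9999:Int)) from by omega]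
    norm_num
    split <;> simp_all
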